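-- pv_equiv track=rewrite | github.com/MovEaxEsp/bdeformat | pythonx/bdeutil.py | tryWriteBdeGroupOneLine
-- ===== SOURCE A (Python) =====
-- def tryWriteBdeGroupOneLine(parsedElements, width):
--     """
--     Return the specified 'parsedElements' written on a single line if the
--     result would be at most 'width' characters, or 'None' otherwise
--     """
--
--     for elem in parsedElements:
--         if len(elem[5]) > 0:
--             # If any element has a comment, we can't write on one line
--             return None
--
--     ret = " ".join(
--        [" ".join(filter(len, [elem[0], elem[1] + elem[2], elem[3]])) +
--                  elem[4] + elem[5] for elem in parsedElements])
--
--     return None if len(ret) > width else ret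
-- ===== SOURCE B (Python) =====
-- def tryWriteBdeGroupOneLine(parsedElements, width):
--     """
--     Return the specified 'parsedElements' written on a single line if the
--     result would be at most 'width' characters, or 'None' otherwise
--     """
--     out = None
--     for elem in parsedElements:
--         if len(elem[5]) > 0:
--             # a comment forces multi-line output
--             return None
--         piece = " ".join(filter(len, [elem[0], elem[1] + elem[2], elem[3]])) + elem[4]
--         out = piece if out is None else out + " " + piece
--     if out is None:
--         out = ""
--     return None if len(out) > width else out
-- ===== Notes on version B (the rewrite author's own statement) =====
-- stated objective: alternative
-- what changed: Fuses A's two traversals (comment scan, then a list comprehension joined at the end) into one pass that builds the output string incrementally in an Option accumulator, with no intermediate list of pieces and no outer join; it also drops the append of elem[5], which is provably empty at that point.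
import Mathlib
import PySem

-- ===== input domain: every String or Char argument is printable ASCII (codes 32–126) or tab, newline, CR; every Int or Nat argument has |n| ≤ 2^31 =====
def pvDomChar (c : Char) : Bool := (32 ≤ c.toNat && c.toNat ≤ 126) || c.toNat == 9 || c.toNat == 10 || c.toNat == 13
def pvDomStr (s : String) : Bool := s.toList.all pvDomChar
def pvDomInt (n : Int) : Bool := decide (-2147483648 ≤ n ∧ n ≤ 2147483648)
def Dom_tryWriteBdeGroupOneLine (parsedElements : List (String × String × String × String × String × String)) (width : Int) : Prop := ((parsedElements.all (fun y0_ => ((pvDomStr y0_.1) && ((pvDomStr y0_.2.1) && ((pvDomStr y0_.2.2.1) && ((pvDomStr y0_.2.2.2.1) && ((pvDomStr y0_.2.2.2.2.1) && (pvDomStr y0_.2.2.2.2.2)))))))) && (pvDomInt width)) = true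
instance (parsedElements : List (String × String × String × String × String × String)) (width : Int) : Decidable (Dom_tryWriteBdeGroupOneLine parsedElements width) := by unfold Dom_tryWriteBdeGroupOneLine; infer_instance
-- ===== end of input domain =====

-- B fuses A's two traversals into one pass that grows the output string in an
-- Option accumulator (no intermediate list of pieces, no outer join); equivalence
-- of the RETURN value is proved on all inputs (A is total).

-- ===== PORT A =====
-- A's first loop: 'for elem in parsedElements: if len(elem[5]) > 0: return None'
def pvAcomment : List (String × String × String × String × String × String) → Bool
  | [] => false
  | e :: rest => if PySem.Str.len e.2.2.2.2.2 > 0 then true else pvAcomment rest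

-- one element of A's list comprehension
def pvApiece (e : String × String × String × String × String × String) : String :=
  PySem.Str.join " " (([e.1, e.2.1 ++ e.2.2.1, e.2.2.2.1]).filter (fun s => PySem.Str.len s ≠ 0))
    ++ e.2.2.2.2.1 ++ e.2.2.2.2.2

def tryWriteBdeGroupOneLine (parsedElements : List (String × String × String × String × String × String)) (width : Int) : Option String :=
  if pvAcomment parsedElements then none
  else
    let ret := PySem.Str.join " " (parsedElements.map pvApiece)
    if PySem.Str.len ret > width then none else some ret

-- ===== PORT B =====
def pvBpiece (e : String × String × String × String × String × String) : String :=
  PySem.Str.join " " (([e.1, e.2.1 ++ e.2.2.1, e.2.2.2.1]).filter (fun s => PySem.Str.len s ≠ 0))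
    ++ e.2.2.2.2.1

-- B's single loop; outer none = B's early 'return None'
def pvBloop : List (String × String × String × String × String × String) → Option String → Option (Option String)
  | [], out => some out
  | e :: rest, out =>
    if PySem.Str.len e.2.2.2.2.2 > 0 then none
    else
      let piece := pvBpiece e
      pvBloop rest (some (match out with | none => piece | some s => s ++ " " ++ piece))

def tryWriteBdeGroupOneLine_alt (parsedElements : List (String × String × String × String × String × String)) (width : Int) : Option String :=
  match pvBloop parsedElements none with
  | none => none
  | some out =>
    let o := out.getD ""
    if PySem.Str.len o > width then none else some o

-- ===== PRECONDITION & SPEC =====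
def Spec_tryWriteBdeGroupOneLine (parsedElements : List (String × String × String × String × String × String)) (width : Int) (out : Option String) : Prop := out = tryWriteBdeGroupOneLine_alt parsedElements width
instance (parsedElements : List (String × String × String × String × String × String)) (width : Int) (out : Option String) : Decidable (Spec_tryWriteBdeGroupOneLine parsedElements width out) := by unfold Spec_tryWriteBdeGroupOneLine; infer_instance

-- ===== CLAIM (what is proved, stated in full; the proofs are below) =====
def Claim_equal_tryWriteBdeGroupOneLine : Prop := ∀ (parsedElements : List (String × String × String × String × String × String)) (width : Int), Dom_tryWriteBdeGroupOneLine parsedElements width → Spec_tryWriteBdeGroupOneLine parsedElements width (tryWriteBdeGroupOneLine parsedElements width)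

-- ===== LEMMAS AND PROOFS =====

-- a string of non-positive Python length is empty
lemma str_len_le_zero_eq (s : String) (h : ¬ PySem.Str.len s > 0) : s = "" := by
  rw [PySem.Str.len_eq] at h
  apply String.toList_inj.mp
  have : s.toList.length = 0 := by omega
  simpa using List.length_eq_zero_iff.mp this

lemma join_nil_str : PySem.Str.join " " ([] : List String) = "" := by
  apply String.toList_inj.mp
  simp [PySem.Str.toList_join, PySem.Chars.join_nil]

lemma join_cons_cons_str (p q : String) (rest : List String) :
    PySem.Str.join " " (p :: q :: rest) = p ++ " " ++ PySem.Str.join " " (q :: rest) := by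
  apply String.toList_inj.mp
  simp [PySem.Str.toList_join, PySem.Chars.join_cons_cons]

lemma foldl_sep_pre (xs : List String) : ∀ (t q : String),
    xs.foldl (fun a r => a ++ " " ++ r) (t ++ q) = t ++ xs.foldl (fun a r => a ++ " " ++ r) q := by
  induction xs with
  | nil => intro t q; rfl
  | cons x xs ih =>
      intro t q
      simp only [List.foldl_cons]
      have h1 : t ++ q ++ " " ++ x = t ++ (q ++ " " ++ x) := by
        simp [String.append_assoc]
      rw [h1, ih]

lemma join_eq_foldl (xs : List String) : ∀ (p : String),
    PySem.Str.join " " (p :: xs) = xs.foldl (fun a r => a ++ " " ++ r) p := by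
  induction xs with
  | nil =>
      intro p
      apply String.toList_inj.mp
      simp [PySem.Str.toList_join, PySem.Chars.join_singleton]
  | cons q xs ih =>
      intro p
      rw [join_cons_cons_str, ih, List.foldl_cons]
      rw [foldl_sep_pre xs (p ++ " ") q]

-- B's loop returns none exactly on A's comment condition
lemma bloop_comment (pes : List (String × String × String × String × String × String)) :
    ∀ out, pvAcomment pes = true → pvBloop pes out = none := by
  induction pes with
  | nil => intro out h; exact absurd h (by simp [pvAcomment])
  | cons e rest ih =>
      intro out h
      by_cases hc : PySem.Str.len e.2.2.2.2.2 > 0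
      · rw [pvBloop, if_pos hc]
      · rw [pvAcomment, if_neg hc] at h
        rw [pvBloop, if_neg hc]
        exact ih _ h

-- with no comment, B's loop folds the pieces from a some-accumulator
lemma bloop_some (pes : List (String × String × String × String × String × String)) :
    ∀ s, pvAcomment pes = false →
      pvBloop pes (some s) = some (some (pes.foldl (fun a e => a ++ " " ++ pvBpiece e) s)) := by
  induction pes with
  | nil => intro s _; rfl
  | cons e rest ih =>
      intro s h
      have hc : ¬ PySem.Str.len e.2.2.2.2.2 > 0 := by
        intro hpos
        rw [pvAcomment, if_pos hpos] at h
        exact absurd h (by decide)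
      rw [pvAcomment, if_neg hc] at h
      rw [pvBloop, if_neg hc, List.foldl_cons]
      exact ih _ h

-- with no comment, every elem[5] is empty, so A's piece equals B's piece
lemma piece_eq (pes : List (String × String × String × String × String × String))
    (h : pvAcomment pes = false) :
    ∀ e ∈ pes, pvApiece e = pvBpiece e := by
  induction pes with
  | nil => intro e he; simp at he
  | cons x rest ih =>
      have hc : ¬ PySem.Str.len x.2.2.2.2.2 > 0 := by
        intro hpos
        rw [pvAcomment, if_pos hpos] at h
        exact absurd h (by decide)
      rw [pvAcomment, if_neg hc] at h
      intro e he
      rcases List.mem_cons.mp he with rfl | hmem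
      · have h5 : e.2.2.2.2.2 = "" := str_len_le_zero_eq _ hc
        simp [pvApiece, pvBpiece, h5]
      · exact ih h e hmem

-- ===== VERDICT (by name: the statement is the Claim_ definition above) =====
theorem tryWriteBdeGroupOneLine_spec : Claim_equal_tryWriteBdeGroupOneLine := by
  intro pes width _
  unfold Spec_tryWriteBdeGroupOneLine tryWriteBdeGroupOneLine tryWriteBdeGroupOneLine_alt
  by_cases hc : pvAcomment pes = true
  · rw [bloop_comment pes none hc]
    simp [hc]
  · have hc' : pvAcomment pes = false := by simpa using hc
    match pes, hc' with
    | [], _ =>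
        simp [pvAcomment, pvBloop, join_nil_str]
    | e :: rest, hc' =>
        have he : ¬ PySem.Str.len e.2.2.2.2.2 > 0 := by
          intro hpos
          rw [pvAcomment, if_pos hpos] at hc'
          exact absurd hc' (by decide)
        have hrest : pvAcomment rest = false := by
          rw [pvAcomment, if_neg he] at hc'
          exact hc'
        have hall : pvAcomment (e :: rest) = false := by
          rw [pvAcomment, if_neg he]; exact hrest
        have hloop : pvBloop (e :: rest) none = some (some (rest.foldl (fun a x => a ++ " " ++ pvBpiece x) (pvBpiece e))) := by
          rw [pvBloop, if_neg he]
          exact bloop_some rest _ hrest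
        have hret : PySem.Str.join " " ((e :: rest).map pvApiece)
            = rest.foldl (fun a x => a ++ " " ++ pvBpiece x) (pvBpiece e) := by
          have h1 : PySem.Str.join " " ((e :: rest).map pvApiece)
              = (rest.map pvApiece).foldl (fun a r => a ++ " " ++ r) (pvApiece e) := by
            simp only [List.map_cons]
            exact join_eq_foldl _ _
          rw [h1, List.foldl_map]
          rw [piece_eq (e :: rest) hall e (by simp)]
          exact PySem.List.foldl_congr_mem rest _ _ _
            (fun a x hx => by rw [piece_eq (e :: rest) hall x (by simp [hx])])
        rw [hloop]
        simp only [hall, Bool.false_eq_true, if_false]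
        rw [hret]
        simp [Option.getD]
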